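-- pv_equiv track=rewrite | github.com/sean-galloway/RTLDesignSherpa | bin/CocoTBFramework/tbclasses/monbus/monbus_event_factories.py | validate_event_dict
-- ===== SOURCE A (Python) =====
-- from typing import Dict, Any
--
-- def validate_event_dict(event_dict: Dict[str, Any]) -> bool:
--     """Validate that an event dictionary has all required fields"""
--     required_fields = ['pkt_type', 'protocol', 'event_code',
--                     'channel_id', 'unit_id', 'agent_id', 'data']
--
--     for field in required_fields:
--         if field not in event_dict:
--             return False
--
--     # Basic range validation - UPDATED
--     if not (0 <= event_dict['pkt_type'] <= 0xF):
--         return False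
--     if not (0 <= event_dict['protocol'] <= 0x7):  # ✅ CORRECTED: 3 bits = 0-7 range
--         return False
--     if not (0 <= event_dict['event_code'] <= 0xF):
--         return False
--     if not (0 <= event_dict['channel_id'] <= 0x3F):
--         return False
--     if not (0 <= event_dict['unit_id'] <= 0xF):
--         return False
--     if not (0 <= event_dict['agent_id'] <= 0xFF):
--         return False
--     if not (0 <= event_dict['data'] <= 0x7FFFFFFFF):  # ✅ CORRECTED: 35-bit max
--         return False
--
--     return True
-- ===== SOURCE B (Python) =====
-- from typing import Dict, Any
--
-- def validate_event_dict(event_dict: Dict[str, Any]) -> bool: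
--     """Validate that an event dictionary has all required fields"""
--     bounds = {'pkt_type': 0xF, 'protocol': 0x7, 'event_code': 0xF,
--               'channel_id': 0x3F, 'unit_id': 0xF, 'agent_id': 0xFF,
--               'data': 0x7FFFFFFFF}
--     hits = 0
--     for field, value in event_dict.items():
--         hi = bounds.get(field)
--         if hi is not None and 0 <= value <= hi:
--             hits += 1
--     return hits == len(bounds)
-- ===== Notes on version B (the rewrite author's own statement) =====
-- stated objective: alternative
-- what changed: B makes one counting pass over the event dict's items against a bounds table (count items whose key is a required field and whose value is within its bound, return count == 7) instead of A's presence loop over the required-field list followed by seven unrolled range checks.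
import Mathlib
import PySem

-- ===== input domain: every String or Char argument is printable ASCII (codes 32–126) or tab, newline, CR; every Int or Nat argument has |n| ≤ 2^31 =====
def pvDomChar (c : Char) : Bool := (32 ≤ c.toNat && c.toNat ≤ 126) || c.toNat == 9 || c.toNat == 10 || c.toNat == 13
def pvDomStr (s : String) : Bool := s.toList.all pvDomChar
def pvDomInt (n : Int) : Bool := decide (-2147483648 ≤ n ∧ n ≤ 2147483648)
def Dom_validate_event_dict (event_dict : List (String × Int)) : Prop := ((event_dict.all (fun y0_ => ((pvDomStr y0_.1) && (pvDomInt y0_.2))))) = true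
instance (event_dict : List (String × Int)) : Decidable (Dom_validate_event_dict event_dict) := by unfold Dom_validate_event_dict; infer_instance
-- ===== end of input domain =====

-- B replaces A's presence loop plus seven unrolled range checks by one counting pass
-- over the dict's items against a bounds table (objective: alternative; same cost).

-- ===== PORT A =====
-- for field in required_fields: if field not in event_dict: return False
def pvCheckPresence (d : PySem.Dict String Int) : List String → Bool
  | [] => true
  | f :: rest => if d.contains f = false then false else pvCheckPresence d rest

-- each event_dict['k'] lookup happens after the presence loop succeeded, so the key is
-- present and Dict.getD _ 0 is exact (the default is never taken)
def validate_event_dict (event_dict : List (String × Int)) : Bool :=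
  let d := PySem.Dict.mk event_dict
  if pvCheckPresence d ["pkt_type", "protocol", "event_code",
                        "channel_id", "unit_id", "agent_id", "data"] = false then false
  else if !(decide (0 ≤ d.getD "pkt_type" 0 ∧ d.getD "pkt_type" 0 ≤ 0xF)) then false
  else if !(decide (0 ≤ d.getD "protocol" 0 ∧ d.getD "protocol" 0 ≤ 0x7)) then false
  else if !(decide (0 ≤ d.getD "event_code" 0 ∧ d.getD "event_code" 0 ≤ 0xF)) then false
  else if !(decide (0 ≤ d.getD "channel_id" 0 ∧ d.getD "channel_id" 0 ≤ 0x3F)) then false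
  else if !(decide (0 ≤ d.getD "unit_id" 0 ∧ d.getD "unit_id" 0 ≤ 0xF)) then false
  else if !(decide (0 ≤ d.getD "agent_id" 0 ∧ d.getD "agent_id" 0 ≤ 0xFF)) then false
  else if !(decide (0 ≤ d.getD "data" 0 ∧ d.getD "data" 0 ≤ 0x7FFFFFFFF)) then false
  else true

-- ===== PORT B =====
-- bounds = {'pkt_type': 0xF, ..., 'data': 0x7FFFFFFFF}
def pvBounds : PySem.Dict String Int :=
  PySem.Dict.mk [("pkt_type", 0xF), ("protocol", 0x7), ("event_code", 0xF),
                 ("channel_id", 0x3F), ("unit_id", 0xF), ("agent_id", 0xFF),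
                 ("data", 0x7FFFFFFFF)]

-- for field, value in event_dict.items(): hi = bounds.get(field);
--   if hi is not None and 0 <= value <= hi: hits += 1
-- return hits == len(bounds)
def validate_event_dict_alt (event_dict : List (String × Int)) : Bool :=
  let hits : Int := event_dict.foldl (fun (hits : Int) (p : String × Int) =>
      (pvBounds.get? p.1).elim hits (fun hi =>
        if 0 ≤ p.2 ∧ p.2 ≤ hi then hits + 1 else hits)) 0
  decide (hits = (pvBounds.size : Int))

-- ===== PRECONDITION & SPEC =====
-- Pre_ excludes association lists with duplicate keys: a Python dict cannot contain
-- them, so which occurrence the list encoding means is accidental (first vs last).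
def Pre_validate_event_dict (event_dict : List (String × Int)) : Prop :=
  (event_dict.map Prod.fst).Nodup
instance (event_dict : List (String × Int)) : Decidable (Pre_validate_event_dict event_dict) := by unfold Pre_validate_event_dict; infer_instance

def pvWitness_validate_event_dict : (List (String × Int)) :=
  [("pkt_type", 1), ("protocol", 2), ("event_code", 3), ("channel_id", 4),
   ("unit_id", 5), ("agent_id", 6), ("data", 7)]

def Spec_validate_event_dict (event_dict : List (String × Int)) (out : Bool) : Prop := out = validate_event_dict_alt event_dict
instance (event_dict : List (String × Int)) (out : Bool) : Decidable (Spec_validate_event_dict event_dict out) := by unfold Spec_validate_event_dict; infer_instance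

-- ===== CLAIM (what is proved, stated in full; the proofs are below) =====
def Claim_equal_validate_event_dict : Prop := ∀ (event_dict : List (String × Int)), Dom_validate_event_dict event_dict → Pre_validate_event_dict event_dict → Spec_validate_event_dict event_dict (validate_event_dict event_dict)

-- ===== LEMMAS AND PROOFS =====

-- the required-field list (= the keys of pvBounds)
def pvFields : List String :=
  ["pkt_type", "protocol", "event_code", "channel_id", "unit_id", "agent_id", "data"]

-- the test applied to each item of the dict by B's loop
def pvQ (p : String × Int) : Bool :=
  match pvBounds.get? p.1 with
  | some hi => decide (0 ≤ p.2 ∧ p.2 ≤ hi)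
  | none => false

-- counting the items whose key is f: with nodup keys there is at most one, so the
-- count is 1 or 0 according to whether some item with key f passes the test
theorem pv_count_key (f : String) (q : String × Int → Bool)
    (l : List (String × Int)) (hn : (l.map Prod.fst).Nodup) :
    l.countP (fun p => p.1 == f && q p) =
      (if l.any (fun p => p.1 == f && q p) then 1 else 0) := by
  induction l with
  | nil => simp
  | cons p t ih =>
    simp only [List.map_cons, List.nodup_cons] at hn
    obtain ⟨hp, hnt⟩ := hn
    rw [List.countP_cons, List.any_cons, ih hnt]
    cases hb : (p.1 == f && q p) with
    | true =>
      have hf : p.1 = f := eq_of_beq (Bool.and_eq_true_iff.1 hb).1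
      have hkey : ∀ x ∈ t, (x.1 == f && q x) = false := by
        intro x hx
        have hne : x.1 ≠ f := fun h => hp (by
          rw [hf, ← h]; exact List.mem_map_of_mem hx)
        simp [hne]
      have ha : t.any (fun p => p.1 == f && q p) = false :=
        List.any_eq_false.2 (fun x hx => by simp [hkey x hx])
      rw [ha]; simp
    | false =>
      rw [Bool.false_or]; simp

-- a count over a disjunction of element-wise disjoint tests splits into a sum
theorem pv_countP_or_disj {α : Type} (a b : α → Bool) (l : List α)
    (h : ∀ x ∈ l, ¬(a x = true ∧ b x = true)) :
    l.countP (fun x => a x || b x) = l.countP a + l.countP b := by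
  induction l with
  | nil => simp
  | cons x t ih =>
    simp only [List.countP_cons]
    rw [ih (fun y hy => h y (List.mem_cons_of_mem x hy))]
    have := h x (List.mem_cons_self)
    cases ha : a x <;> cases hb : b x <;> simp_all <;> omega

-- splitting a membership-guarded count over a nodup list of keys
theorem pv_count_split (q : String × Int → Bool) (l : List (String × Int))
    (hn : (l.map Prod.fst).Nodup) :
    ∀ (fs : List String), fs.Nodup →
      l.countP (fun p => decide (p.1 ∈ fs) && q p) =
        fs.countP (fun f => l.any (fun p => p.1 == f && q p)) := by
  intro fs hfs
  induction fs with
  | nil => simp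
  | cons f fs ih =>
    simp only [List.nodup_cons] at hfs
    obtain ⟨hf, hfs'⟩ := hfs
    have hcong : l.countP (fun p => decide (p.1 ∈ f :: fs) && q p) =
        l.countP (fun p => (p.1 == f && q p) || (decide (p.1 ∈ fs) && q p)) := by
      apply List.countP_congr
      intro p _
      by_cases h1 : p.1 = f <;> by_cases h2 : p.1 ∈ fs <;> simp [h1, h2]
    rw [hcong, pv_countP_or_disj]
    · rw [pv_count_key f q l hn, ih hfs', List.countP_cons]
      simp [Nat.add_comm]
    · intro p _
      rintro ⟨h1, h2⟩
      simp only [Bool.and_eq_true, beq_iff_eq, decide_eq_true_eq] at h1 h2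
      exact hf (h1.1 ▸ h2.1)

-- with nodup keys, "some item with key f passes" is a statement about the lookup
theorem pv_any_key (l : List (String × Int)) (hn : (l.map Prod.fst).Nodup)
    (f : String) (q : String × Int → Bool) :
    l.any (fun p => p.1 == f && q p) =
      ((PySem.Dict.mk l).get? f).elim false (fun v => q (f, v)) := by
  have hkeys : (PySem.Dict.mk l).keys.Nodup := hn
  cases hget : (PySem.Dict.mk l).get? f with
  | none =>
    have hnm : f ∉ (PySem.Dict.mk l).keys :=
      (PySem.Dict.get?_eq_none_iff_not_mem_keys _ _).1 hget
    simp only [Option.elim]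
    rw [List.any_eq_false]
    intro p hp
    have : p.1 ≠ f := fun h => hnm (h ▸ List.mem_map_of_mem hp)
    simp [this]
  | some v =>
    have hmem : (f, v) ∈ l :=
      (PySem.Dict.get?_eq_some_iff_mem_items _ _ _ hkeys).1 hget
    simp only [Option.elim]
    cases hq : q (f, v) with
    | true =>
      rw [List.any_eq_true]
      exact ⟨(f, v), hmem, by simp [hq]⟩
    | false =>
      rw [List.any_eq_false]
      intro p hp
      by_cases h : p.1 = f
      · have : p = (f, v) := List.inj_on_of_nodup_map hn hp hmem (by simp [h])
        simp [this, hq]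
      · simp [h]

-- B's loop is a count of the items passing pvQ
theorem pv_alt_eq_countP (l : List (String × Int)) :
    validate_event_dict_alt l = decide (l.countP pvQ = 7) := by
  simp only [validate_event_dict_alt]
  have hbody : ∀ (acc : Int) (p : String × Int), p ∈ l →
      ((pvBounds.get? p.1).elim acc (fun hi =>
        if 0 ≤ p.2 ∧ p.2 ≤ hi then acc + 1 else acc)) =
        if pvQ p then acc + 1 else acc := by
    intro acc p _
    unfold pvQ
    cases h : pvBounds.get? p.1 <;> simp
  rw [PySem.List.foldl_congr_mem l
        (fun (hits : Int) (p : String × Int) =>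
          (pvBounds.get? p.1).elim hits (fun hi =>
            if 0 ≤ p.2 ∧ p.2 ≤ hi then hits + 1 else hits))
        (fun (acc : Int) (p : String × Int) => if pvQ p then acc + 1 else acc)
        0 hbody,
      PySem.List.foldl_if_add_one pvQ l 0]
  have hsize : (pvBounds.size : Int) = 7 := rfl
  rw [hsize]
  simp [decide_eq_decide]
  omega

-- ===== VERDICT (by name: the statement is the Claim_ definition above) =====
set_option maxHeartbeats 1000000 in
theorem validate_event_dict_spec : Claim_equal_validate_event_dict := by
  intro l _ hpre
  unfold Spec_validate_event_dict
  have hn : (l.map Prod.fst).Nodup := hpre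
  rw [pv_alt_eq_countP]
  have hsplit : l.countP pvQ =
      pvFields.countP (fun f => l.any (fun p => p.1 == f && pvQ p)) := by
    rw [← pv_count_split pvQ l hn pvFields (by decide)]
    apply List.countP_congr
    intro p _
    by_cases h : p.1 ∈ pvFields
    · simp [h]
    · have hkeys : pvBounds.keys = pvFields := rfl
      have hnone : pvBounds.get? p.1 = none :=
        (PySem.Dict.get?_eq_none_iff_not_mem_keys _ _).2 (hkeys ▸ h)
      simp [h, pvQ, hnone]
  rw [Bool.eq_iff_iff, decide_eq_true_eq, hsplit,
      show (7 : Nat) = pvFields.length from rfl, List.countP_eq_length]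
  simp only [pvFields, List.forall_mem_cons]
  simp only [pv_any_key l hn]
  simp only [validate_event_dict, pvCheckPresence,
    PySem.Dict.contains_eq_isSome_get?, PySem.Dict.getD_eq_get?_getD]
  obtain ⟨o1, ho1⟩ : ∃ o, (PySem.Dict.mk l).get? "pkt_type" = o := ⟨_, rfl⟩
  obtain ⟨o2, ho2⟩ : ∃ o, (PySem.Dict.mk l).get? "protocol" = o := ⟨_, rfl⟩
  obtain ⟨o3, ho3⟩ : ∃ o, (PySem.Dict.mk l).get? "event_code" = o := ⟨_, rfl⟩
  obtain ⟨o4, ho4⟩ : ∃ o, (PySem.Dict.mk l).get? "channel_id" = o := ⟨_, rfl⟩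
  obtain ⟨o5, ho5⟩ : ∃ o, (PySem.Dict.mk l).get? "unit_id" = o := ⟨_, rfl⟩
  obtain ⟨o6, ho6⟩ : ∃ o, (PySem.Dict.mk l).get? "agent_id" = o := ⟨_, rfl⟩
  obtain ⟨o7, ho7⟩ : ∃ o, (PySem.Dict.mk l).get? "data" = o := ⟨_, rfl⟩
  simp only [ho1, ho2, ho3, ho4, ho5, ho6, ho7]
  have hq1 : ∀ v : Int, pvQ ("pkt_type", v) = decide (0 ≤ v ∧ v ≤ 15) := fun _ => rfl
  have hq2 : ∀ v : Int, pvQ ("protocol", v) = decide (0 ≤ v ∧ v ≤ 7) := fun _ => rfl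
  have hq3 : ∀ v : Int, pvQ ("event_code", v) = decide (0 ≤ v ∧ v ≤ 15) := fun _ => rfl
  have hq4 : ∀ v : Int, pvQ ("channel_id", v) = decide (0 ≤ v ∧ v ≤ 63) := fun _ => rfl
  have hq5 : ∀ v : Int, pvQ ("unit_id", v) = decide (0 ≤ v ∧ v ≤ 15) := fun _ => rfl
  have hq6 : ∀ v : Int, pvQ ("agent_id", v) = decide (0 ≤ v ∧ v ≤ 255) := fun _ => rfl
  have hq7 : ∀ v : Int, pvQ ("data", v) = decide (0 ≤ v ∧ v ≤ 34359738367) := fun _ => rfl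
  cases o1 <;> cases o2 <;> cases o3 <;> cases o4 <;> cases o5 <;> cases o6 <;> cases o7 <;>
    simp [hq1, hq2, hq3, hq4, hq5, hq6, hq7, Option.elim]
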